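-- pv_equiv track=rewrite | github.com/Esgorotg666/Midnight-Crypto-Bot-Trading | app.py | _format_pairs_list
-- ===== SOURCE A (Python) =====
-- def _format_pairs_list(pairs: list[str], max_show: int = 60) -> str:
--     if not pairs: return "(none)"
--     shown=pairs[:max_show]; more=len(pairs)-len(shown)
--     lines,line=[],[]
--     for i,sym in enumerate(shown,1):
--         line.append(sym)
--         if (i%8)==0: lines.append(", ".join(line)); line=[]
--     if line: lines.append(", ".join(line))
--     if more>0: lines.append(f"... and {more} more")
--     return "\n".join(lines)
-- ===== SOURCE B (Python) =====
-- def _format_pairs_list(pairs: list[str], max_show: int = 60) -> str: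
--     if not pairs:
--         return "(none)"
--     shown = pairs[:max_show]
--     more = len(pairs) - len(shown)
--     lines = [", ".join(shown[i:i+8]) for i in range(0, len(shown), 8)]
--     if more > 0:
--         lines.append(f"... and {more} more")
--     return "\n".join(lines)
-- ===== Notes on version B (the rewrite author's own statement) =====
-- stated objective: simpler
-- what changed: Replaces the per-symbol enumerate loop with its modulo-8 counter, mutable line buffer and post-loop flush by a one-line grouper comprehension that slices 8-element chunks directly from chunk-start indices.
import Mathlib
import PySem

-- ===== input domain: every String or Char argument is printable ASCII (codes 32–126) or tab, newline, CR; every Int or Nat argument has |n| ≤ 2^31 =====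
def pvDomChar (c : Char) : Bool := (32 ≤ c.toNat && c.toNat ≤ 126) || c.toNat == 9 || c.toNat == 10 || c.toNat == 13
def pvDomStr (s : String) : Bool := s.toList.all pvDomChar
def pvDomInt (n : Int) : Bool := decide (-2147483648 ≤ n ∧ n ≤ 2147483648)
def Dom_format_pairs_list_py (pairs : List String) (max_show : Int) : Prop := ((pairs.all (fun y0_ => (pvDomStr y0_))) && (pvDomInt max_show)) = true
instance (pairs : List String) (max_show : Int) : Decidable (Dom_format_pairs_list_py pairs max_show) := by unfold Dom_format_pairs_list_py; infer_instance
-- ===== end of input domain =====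

-- B replaces A's per-symbol counter/buffer/flush loop by a grouper comprehension slicing 8-element chunks (simpler); same return value.


-- ===== PORT A =====
-- loop body of A's 'for i,sym in enumerate(shown,1)': state = (lines, line)
def aStep (st : List String × List String) (p : Int × String) : List String × List String :=
  let line := st.2 ++ [p.2]
  if PySem.Int.mod p.1 8 = 0 then (st.1 ++ [PySem.Str.join ", " line], []) else (st.1, line)

def format_pairs_list_py (pairs : List String) (max_show : Int) : String :=
  if pairs = [] then "(none)"
  else
    let shown := PySem.List.slice pairs none (some max_show)
    let more : Int := (pairs.length : Int) - (shown.length : Int)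
    let st := (PySem.List.enumerate shown 1).foldl aStep ([], [])
    let lines := if st.2 ≠ [] then st.1 ++ [PySem.Str.join ", " st.2] else st.1
    let lines := if more > 0 then lines ++ ["... and " ++ PySem.Int.toStr more ++ " more"] else lines
    PySem.Str.join "\n" lines

-- ===== PORT B =====
-- B's grouper: [", ".join(shown[i:i+8]) for i in range(0, len(shown), 8)]
def format_pairs_list_py_alt (pairs : List String) (max_show : Int) : String :=
  if pairs = [] then "(none)"
  else
    let shown := PySem.List.slice pairs none (some max_show)
    let more : Int := (pairs.length : Int) - (shown.length : Int)
    let lines := (PySem.List.pyRange 0 (shown.length : Int) 8).map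
        (fun i => PySem.Str.join ", " (PySem.List.slice shown (some i) (some (i + 8))))
    let lines := if more > 0 then lines ++ ["... and " ++ PySem.Int.toStr more ++ " more"] else lines
    PySem.Str.join "\n" lines

-- ===== PRECONDITION & SPEC =====
def Spec_format_pairs_list_py (pairs : List String) (max_show : Int) (out : String) : Prop := out = format_pairs_list_py_alt pairs max_show
instance (pairs : List String) (max_show : Int) (out : String) : Decidable (Spec_format_pairs_list_py pairs max_show out) := by unfold Spec_format_pairs_list_py; infer_instance

-- ===== CLAIM (what is proved, stated in full; the proofs are below) =====
def Claim_equal_format_pairs_list_py : Prop := ∀ (pairs : List String) (max_show : Int), Dom_format_pairs_list_py pairs max_show → Spec_format_pairs_list_py pairs max_show (format_pairs_list_py pairs max_show)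

-- ===== LEMMAS AND PROOFS =====

-- common reference shape: the list of ", "-joined 8-chunks of l
def altChunkLines : List String → List String
  | [] => []
  | x :: xs => PySem.Str.join ", " ((x :: xs).take 8) :: altChunkLines ((x :: xs).drop 8)
termination_by l => l.length
decreasing_by simp

lemma altChunkLines_nil : altChunkLines [] = [] := by rw [altChunkLines]

lemma altChunkLines_cons (x : String) (xs : List String) :
    altChunkLines (x :: xs) = PySem.Str.join ", " ((x :: xs).take 8) :: altChunkLines ((x :: xs).drop 8) := by
  rw [altChunkLines]

-- A's loop state generalised: partial chunk 'acc' already holds the symbols of the current line buffer.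
def altPartial (acc l : List String) : List String :=
  if acc = [] then altChunkLines l
  else PySem.Str.join ", " (acc ++ l.take (8 - acc.length)) :: altChunkLines (l.drop (8 - acc.length))

lemma loopA : ∀ (l lines acc : List String) (i : Int),
    acc.length < 8 → PySem.Int.mod i 8 = ((acc.length : Int) + 1) % 8 →
    (let st := (PySem.List.enumerate l i).foldl aStep (lines, acc)
     if st.2 ≠ [] then st.1 ++ [PySem.Str.join ", " st.2] else st.1)
      = lines ++ altPartial acc l := by
  intro l
  induction l with
  | nil =>
    intro lines acc i _ _
    simp only [PySem.List.enumerate_nil, List.foldl_nil, altPartial]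
    by_cases h : acc = [] <;> simp [h, altChunkLines_nil]
  | cons x xs ih =>
    intro lines acc i hlt hmod
    have hmod' : i % 8 = ((acc.length : Int) + 1) % 8 := by
      rw [← PySem.Int.mod_eq_emod_of_pos (a := i) (by norm_num)]; exact hmod
    simp only [PySem.List.enumerate_cons, List.foldl_cons]
    by_cases h7 : acc.length = 7
    · have hz : PySem.Int.mod i 8 = 0 := by
        rw [PySem.Int.mod_eq_emod_of_pos (by norm_num)]; omega
      have hstep : aStep (lines, acc) (i, x) = (lines ++ [PySem.Str.join ", " (acc ++ [x])], []) := by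
        simp only [aStep]; rw [if_pos hz]
      rw [hstep, ih (lines ++ [PySem.Str.join ", " (acc ++ [x])]) [] (i + 1)
        (by simp)
        (by rw [PySem.Int.mod_eq_emod_of_pos (by norm_num)]
            simp only [List.length_nil]; omega)]
      have hacc : acc ≠ [] := by intro h; simp [h] at h7
      simp only [altPartial, if_neg hacc, h7]
      have ht : (x :: xs).take (8 - 7) = [x] := by simp
      have hd : (x :: xs).drop (8 - 7) = xs := by simp
      by_cases hxs : xs = [] <;>
        simp [ht, hd, List.append_assoc, hxs, altChunkLines_nil]
    · have hnz : ¬ PySem.Int.mod i 8 = 0 := by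
        rw [PySem.Int.mod_eq_emod_of_pos (by norm_num)]; omega
      have hstep : aStep (lines, acc) (i, x) = (lines, acc ++ [x]) := by
        simp only [aStep]; rw [if_neg hnz]
      rw [hstep, ih lines (acc ++ [x]) (i + 1)
        (by simp only [List.length_append, List.length_cons, List.length_nil]; omega)
        (by rw [PySem.Int.mod_eq_emod_of_pos (by norm_num)]
            simp only [List.length_append, List.length_cons, List.length_nil]
            push_cast; omega)]
      congr 1
      -- altPartial (acc ++ [x]) xs = altPartial acc (x :: xs)
      have hne : acc ++ [x] ≠ [] := by simp
      by_cases hacc : acc = []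
      · subst hacc
        simp only [altPartial, List.nil_append, List.length_cons,
          List.length_nil, altChunkLines_cons]
        have ht : (x :: xs).take 8 = x :: xs.take 7 := by rw [List.take_succ_cons]
        have hd : (x :: xs).drop 8 = xs.drop 7 := by rw [List.drop_succ_cons]
        simp [ht, hd]
      · simp only [altPartial, if_neg hne, if_neg hacc]
        have hlen : (acc ++ [x]).length = acc.length + 1 := by simp
        have hs : 8 - acc.length = (8 - (acc.length + 1)) + 1 := by omega
        have ht : (x :: xs).take (8 - acc.length) = x :: xs.take (8 - (acc.length + 1)) := by
          rw [hs, List.take_succ_cons]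
        have hd : (x :: xs).drop (8 - acc.length) = xs.drop (8 - (acc.length + 1)) := by
          rw [hs, List.drop_succ_cons]
        rw [hlen, ht, hd]
        simp [List.append_assoc]

-- one step of the step-8 range, for B's grouper
lemma pyRange8_cons (b : Int) (h : 0 < b) :
    PySem.List.pyRange 0 b 8 = 0 :: (PySem.List.pyRange 0 (b - 8) 8).map (· + 8) := by
  rw [PySem.List.pyRange_of_pos _ _ (by norm_num), PySem.List.pyRange_of_pos _ _ (by norm_num)]
  by_cases h8 : 0 < b - 8
  · rw [if_pos h, if_pos h8]
    have hc : ((b - 0 + 8 - 1) / 8).toNat = ((b - 8 - 0 + 8 - 1) / 8).toNat + 1 := by omega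
    rw [hc, List.range_succ_eq_map]
    simp only [List.map_cons, List.map_map, Function.comp_def]
    refine List.cons_eq_cons.mpr ⟨by norm_num, ?_⟩
    apply List.map_congr_left
    intro k _
    push_cast; ring
  · rw [if_pos h, if_neg h8]
    have hc : ((b - 0 + 8 - 1) / 8).toNat = 1 := by omega
    rw [hc]
    simp

-- B's grouper map equals the chunk list
lemma mapRange8 : ∀ (n : Nat) (l : List String), l.length ≤ n →
    (PySem.List.pyRange 0 (l.length : Int) 8).map
        (fun i => PySem.Str.join ", " (PySem.List.slice l (some i) (some (i + 8))))
      = altChunkLines l := by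
  intro n
  induction n with
  | zero =>
    intro l hl
    have h0 : l = [] := List.length_eq_zero_iff.mp (Nat.le_zero.mp hl)
    subst h0
    rw [PySem.List.pyRange_of_pos _ _ (by norm_num)]
    simp [altChunkLines_nil]
  | succ n ih =>
    intro l hl
    match l with
    | [] =>
      rw [PySem.List.pyRange_of_pos _ _ (by norm_num)]
      simp [altChunkLines_nil]
    | x :: xs =>
      have hpos : (0:Int) < ((x :: xs).length : Int) := by exact_mod_cast Nat.succ_pos xs.length
      rw [pyRange8_cons _ hpos, altChunkLines_cons]
      simp only [List.map_cons, List.map_map, Function.comp_def]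
      refine List.cons_eq_cons.mpr ⟨?_, ?_⟩
      · -- head chunk: l[0:8] is take 8
        rw [show (0:Int) + 8 = ((8:Nat):Int) from by norm_num]
        rw [PySem.List.slice_zero_start, PySem.List.slice_to_natCast]
      · -- tail chunks shift onto l.drop 8
        have key : ∀ i ∈ PySem.List.pyRange 0 (((x :: xs).length : Int) - 8) 8,
            PySem.Str.join ", " (PySem.List.slice (x :: xs) (some (i + 8)) (some (i + 8 + 8)))
              = PySem.Str.join ", " (PySem.List.slice ((x :: xs).drop 8) (some i) (some (i + 8))) := by
          intro i hi
          have h0i : 0 ≤ i := ((PySem.List.mem_pyRange_iff_of_pos (by norm_num) i).mp hi).1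
          congr 1
          rw [PySem.List.slice_toNat (x :: xs) (a := i + 8) (b := i + 8 + 8) (by omega) (by omega),
              PySem.List.slice_toNat ((x :: xs).drop 8) (a := i) (b := i + 8) h0i (by omega),
              show (i + 8 + 8).toNat - (i + 8).toNat = 8 from by omega,
              show (i + 8).toNat - i.toNat = 8 from by omega,
              show (i + 8).toNat = 8 + i.toNat from by omega,
              List.drop_drop]
        rw [List.map_congr_left key]
        by_cases h8 : 8 ≤ (x :: xs).length
        · have hlen : ((x :: xs).length : Int) - 8 = (((x :: xs).drop 8).length : Int) := by
            simp only [List.length_drop, List.length_cons] at *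
            omega
          have hle : ((x :: xs).drop 8).length ≤ n := by
            simp only [List.length_drop, List.length_cons] at *
            omega
          rw [hlen]
          exact ih _ hle
        · have hd : (x :: xs).drop 8 = [] := List.drop_eq_nil_of_le (by omega)
          rw [hd, PySem.List.pyRange_of_pos _ _ (by norm_num)]
          rw [if_neg (by simp only [List.length_cons] at h8 ⊢; push_cast; omega)]
          simp [altChunkLines_nil]

-- ===== VERDICT (by name: the statement is the Claim_ definition above) =====
theorem format_pairs_list_py_spec : Claim_equal_format_pairs_list_py := by
  intro pairs max_show _
  unfold Spec_format_pairs_list_py format_pairs_list_py format_pairs_list_py_alt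
  by_cases hp : pairs = []
  · simp [hp]
  · simp only [if_neg hp]
    have h := loopA (PySem.List.slice pairs none (some max_show)) [] [] 1
      (by simp) (by decide)
    have h2 : altPartial [] (PySem.List.slice pairs none (some max_show))
        = altChunkLines (PySem.List.slice pairs none (some max_show)) := by
      simp [altPartial]
    rw [h2, List.nil_append] at h
    have hb := mapRange8 (PySem.List.slice pairs none (some max_show)).length
      (PySem.List.slice pairs none (some max_show)) le_rfl
    rw [h, hb]
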